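-- pv_equiv track=rewrite | github.com/jhzII/EulerProject | Task17.py | get_number_length
-- ===== SOURCE A (Python) =====
-- numbers_lengths = {
--     'and': 3,
--     0: 0,
--     1: 3,  # one
--     2: 3,  # two
--     3: 5,  # three
--     4: 4,  # four
--     5: 4,  # five
--     6: 3,  # six
--     7: 5,  # seven
--     8: 5,  # eight
--     9: 4,  # nine
--     10: 3,  # ten
--     11: 6,  # eleven
--     12: 6,  # twelve
--     13: 8,  # thirteen
--     14: 8,  # fourteen
--     15: 7,  # fifteen
--     16: 7,  # sixteen
--     17: 9,  # seventeen
--     18: 8,  # eighteen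
--     19: 8,  # nineteen
--     20: 6,  # twenty
--     30: 6,  # thirty
--     40: 5,  # forty
--     50: 5,  # fifty
--     60: 5,  # sixty
--     70: 7,  # seventy
--     80: 6,  # eighty
--     90: 6,  # ninety
--     100: 7,  # hundred
--     1000: 8,  # thousand
-- }
--
-- def get_number_length(value: int) -> int:
--     """ 0 < value < 10000 """
--
--     number_length = 0
--
--     two_last_digit = value % 100
--
--     if two_last_digit < 21:
--         number_length += numbers_lengths[two_last_digit]
--         value //= 100
--     else:
--         for n in range(2):
--             number_length += numbers_lengths[value % 10 * 10**n]
--             value //= 10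
--
--     if value <= 0:
--         return number_length
--
--     if two_last_digit:
--         number_length += numbers_lengths['and']
--
--     for n in range(2, 4):
--         digit = value % 10
--         if digit:
--             number_length += numbers_lengths[digit]
--             number_length += numbers_lengths[10**n]
--         value //= 10
--         if value <= 0:
--             return number_length
--
--     return number_length
-- ===== SOURCE B (Python) =====
-- SMALL = ['', 'one', 'two', 'three', 'four', 'five', 'six', 'seven', 'eight',
--          'nine', 'ten', 'eleven', 'twelve', 'thirteen', 'fourteen', 'fifteen',
--          'sixteen', 'seventeen', 'eighteen', 'nineteen', 'twenty']
-- TENS = ['', '', 'twenty', 'thirty', 'forty', 'fifty', 'sixty', 'seventy',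
--         'eighty', 'ninety']
--
-- def get_number_length(value: int) -> int:
--     """ 0 < value < 10000 """
--     # Spell the number out (letters only, Euler-17 style) and count the letters.
--     low = value % 100
--     words = SMALL[low] if low < 21 else TENS[low // 10] + SMALL[low % 10]
--     if value // 100 > 0:
--         if low:
--             words += 'and'
--         h = value // 100 % 10
--         if h:
--             words = SMALL[h] + 'hundred' + words
--         th = value // 1000
--         if th > 0 and th % 10:
--             words = SMALL[th % 10] + 'thousand' + words
--     return len(words)
-- ===== Notes on version B (the rewrite author's own statement) =====
-- stated objective: alternative
-- what changed: B drops A's word-length lookup table entirely: it actually spells the number out as its English letters (word tables for units/teens/tens, string concatenation for and/hundred/thousand) and returns the length of the spelled string, instead of A's staged accumulation of per-word lengths from a dict while destructively dividing value.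
import Mathlib
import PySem

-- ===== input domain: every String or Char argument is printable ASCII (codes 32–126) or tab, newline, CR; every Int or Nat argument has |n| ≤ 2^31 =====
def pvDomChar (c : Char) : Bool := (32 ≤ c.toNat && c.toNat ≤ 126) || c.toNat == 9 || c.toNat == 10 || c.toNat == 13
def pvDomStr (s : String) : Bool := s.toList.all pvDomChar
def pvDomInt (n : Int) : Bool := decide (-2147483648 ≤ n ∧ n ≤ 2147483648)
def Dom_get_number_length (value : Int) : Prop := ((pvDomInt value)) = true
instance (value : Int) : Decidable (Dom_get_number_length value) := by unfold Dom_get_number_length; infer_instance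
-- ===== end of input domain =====

-- B drops the word-length table: it spells the number out as its English letters and
-- returns the length of the spelled string (objective: alternative algorithm, same cost).

-- ===== PORT A =====
-- the int-keyed entries of the module dict numbers_lengths; total because every key
-- either program looks up (0..20, 30..90 by tens, 100, 1000) is present in the dict
def numbersLengths (k : Int) : Int :=
  if k = 0 then 0 else if k = 1 then 3 else if k = 2 then 3 else if k = 3 then 5
  else if k = 4 then 4 else if k = 5 then 4 else if k = 6 then 3 else if k = 7 then 5
  else if k = 8 then 5 else if k = 9 then 4 else if k = 10 then 3 else if k = 11 then 6
  else if k = 12 then 6 else if k = 13 then 8 else if k = 14 then 8 else if k = 15 then 7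
  else if k = 16 then 7 else if k = 17 then 9 else if k = 18 then 8 else if k = 19 then 8
  else if k = 20 then 6 else if k = 30 then 6 else if k = 40 then 5 else if k = 50 then 5
  else if k = 60 then 5 else if k = 70 then 7 else if k = 80 then 6 else if k = 90 then 6
  else if k = 100 then 7 else if k = 1000 then 8 else 0

def numbersLengthsAnd : Int := 3   -- numbers_lengths['and']

-- the `for n in range(2, 4)` loop of A, with its early return on value <= 0
def loopHigh : List Int → Int → Int → Int
  | [], number_length, _ => number_length
  | n :: rest, number_length, value =>
    let digit := PySem.Int.mod value 10
    let number_length := if digit ≠ 0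
      then number_length + numbersLengths digit + numbersLengths (10 ^ n.toNat)
      else number_length
    let value := PySem.Int.floordiv value 10
    if value ≤ 0 then number_length else loopHigh rest number_length value

def get_number_length (value : Int) : Int :=
  let two_last_digit := PySem.Int.mod value 100
  let st :=
    if two_last_digit < 21 then
      ((0 : Int) + numbersLengths two_last_digit, PySem.Int.floordiv value 100)
    else
      (PySem.List.pyRange 0 2 1).foldl
        (fun (st : Int × Int) n =>
          (st.1 + numbersLengths (PySem.Int.mod st.2 10 * 10 ^ n.toNat),
           PySem.Int.floordiv st.2 10))
        ((0 : Int), value)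
  let number_length := st.1
  let value := st.2
  if value ≤ 0 then number_length
  else
    let number_length :=
      if two_last_digit ≠ 0 then number_length + numbersLengthsAnd else number_length
    loopHigh (PySem.List.pyRange 2 4 1) number_length value

-- ===== PORT B =====
-- the Python module lists SMALL and TENS of Source B
def pvSmall : List String :=
  ["", "one", "two", "three", "four", "five", "six", "seven", "eight",
   "nine", "ten", "eleven", "twelve", "thirteen", "fourteen", "fifteen",
   "sixteen", "seventeen", "eighteen", "nineteen", "twenty"]

def pvTens : List String :=
  ["", "", "twenty", "thirty", "forty", "fifty", "sixty", "seventy",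
   "eighty", "ninety"]

-- Python list indexing SMALL[i] / TENS[i]; exact here: every index B uses is in range
-- (low < 21 in the first branch, low // 10 in 2..9 in the second, digits in 0..9)
def get_number_length_alt (value : Int) : Int :=
  let low := PySem.Int.mod value 100
  let words :=
    if low < 21 then PySem.List.pyGetD pvSmall low ""
    else PySem.List.pyGetD pvTens (PySem.Int.floordiv low 10) ""
         ++ PySem.List.pyGetD pvSmall (PySem.Int.mod low 10) ""
  let words :=
    if PySem.Int.floordiv value 100 > 0 then
      let words := if low ≠ 0 then words ++ "and" else words
      let h := PySem.Int.mod (PySem.Int.floordiv value 100) 10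
      let words := if h ≠ 0 then PySem.List.pyGetD pvSmall h "" ++ "hundred" ++ words
                   else words
      let th := PySem.Int.floordiv value 1000
      if th > 0 ∧ PySem.Int.mod th 10 ≠ 0 then
        PySem.List.pyGetD pvSmall (PySem.Int.mod th 10) "" ++ "thousand" ++ words
      else words
    else words
  PySem.Str.len words

-- ===== PRECONDITION & SPEC =====
def Spec_get_number_length (value : Int) (out : Int) : Prop := out = get_number_length_alt value
instance (value : Int) (out : Int) : Decidable (Spec_get_number_length value out) := by unfold Spec_get_number_length; infer_instance

-- ===== CLAIM (what is proved, stated in full; the proofs are below) =====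
def Claim_equal_get_number_length : Prop := ∀ (value : Int), Dom_get_number_length value → Spec_get_number_length value (get_number_length value)

-- ===== LEMMAS AND PROOFS =====
theorem mod10_eq (value : Int) :
    PySem.Int.mod value 10 = PySem.Int.mod (PySem.Int.mod value 100) 10 := by
  simp only [PySem.Int.mod_eq_emod_of_pos (by omega : (0:Int) < 10),
    PySem.Int.mod_eq_emod_of_pos (by omega : (0:Int) < 100)]
  omega

theorem tens_eq (value : Int) :
    PySem.Int.mod (PySem.Int.floordiv value 10) 10
      = PySem.Int.floordiv (PySem.Int.mod value 100) 10 := by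
  simp only [PySem.Int.mod_eq_emod_of_pos (by omega : (0:Int) < 10),
    PySem.Int.mod_eq_emod_of_pos (by omega : (0:Int) < 100),
    PySem.Int.floordiv_eq_ediv_of_pos (by omega : (0:Int) < 10)]
  omega

theorem div100_eq (value : Int) :
    PySem.Int.floordiv (PySem.Int.floordiv value 10) 10
      = PySem.Int.floordiv value 100 := by
  simp only [PySem.Int.floordiv_eq_ediv_of_pos (by omega : (0:Int) < 10),
    PySem.Int.floordiv_eq_ediv_of_pos (by omega : (0:Int) < 100)]
  omega

theorem div1000_eq (value : Int) :
    PySem.Int.floordiv (PySem.Int.floordiv value 100) 10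
      = PySem.Int.floordiv value 1000 := by
  simp only [PySem.Int.floordiv_eq_ediv_of_pos (by omega : (0:Int) < 10),
    PySem.Int.floordiv_eq_ediv_of_pos (by omega : (0:Int) < 100),
    PySem.Int.floordiv_eq_ediv_of_pos (by omega : (0:Int) < 1000)]
  omega

-- the spelled word at a small index has exactly the table length A looks up
set_option maxHeartbeats 1000000 in
theorem lenSmall (k : Int) (h0 : 0 ≤ k) (h21 : k < 21) :
    PySem.Str.len (PySem.List.pyGetD pvSmall k "") = numbersLengths k := by
  interval_cases k <;> decide

set_option maxHeartbeats 1000000 in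
theorem lenTens (t : Int) (h2 : 2 ≤ t) (h9 : t ≤ 9) :
    PySem.Str.len (PySem.List.pyGetD pvTens t "") = numbersLengths (t * 10) := by
  interval_cases t <;> decide

-- ===== VERDICT (by name: the statement is the Claim_ definition above) =====
set_option maxHeartbeats 4000000 in
theorem get_number_length_spec : Claim_equal_get_number_length := by
  intro value _
  unfold Spec_get_number_length get_number_length get_number_length_alt
  have hr1 : PySem.List.pyRange 0 2 1 = [0, 1] := by decide
  have hr2 : PySem.List.pyRange 2 4 1 = [2, 3] := by decide
  rw [hr1, hr2]
  have e5 : ((10:Int) ^ ((2:Int)).toNat) = 100 := by decide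
  have e6 : ((10:Int) ^ ((3:Int)).toNat) = 1000 := by decide
  have e7 : ((10:Int) ^ ((0:Int)).toNat) = 1 := by decide
  have e8 : ((10:Int) ^ ((1:Int)).toNat) = 10 := by decide
  simp only [List.foldl, loopHigh, e5, e6, e7, e8, mul_one]
  simp only [mod10_eq value, tens_eq value, div100_eq value]
  -- bounds for the word-length lemmas
  have hl0 : 0 ≤ PySem.Int.mod value 100 := PySem.Int.mod_nonneg value (by omega)
  have hl100 : PySem.Int.mod value 100 < 100 := PySem.Int.mod_lt value (by omega)
  have hm0 : 0 ≤ PySem.Int.mod (PySem.Int.mod value 100) 10 :=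
    PySem.Int.mod_nonneg _ (by omega)
  have hm10 : PySem.Int.mod (PySem.Int.mod value 100) 10 < 10 :=
    PySem.Int.mod_lt _ (by omega)
  have hh0 : 0 ≤ PySem.Int.mod (PySem.Int.floordiv value 100) 10 :=
    PySem.Int.mod_nonneg _ (by omega)
  have hh10 : PySem.Int.mod (PySem.Int.floordiv value 100) 10 < 10 :=
    PySem.Int.mod_lt _ (by omega)
  have ht0 : 0 ≤ PySem.Int.mod (PySem.Int.floordiv value 1000) 10 :=
    PySem.Int.mod_nonneg _ (by omega)
  have ht10 : PySem.Int.mod (PySem.Int.floordiv value 1000) 10 < 10 :=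
    PySem.Int.mod_lt _ (by omega)
  have hdiv : PySem.Int.floordiv (PySem.Int.mod value 100) 10
      = (PySem.Int.mod value 100) / 10 :=
    PySem.Int.floordiv_eq_ediv_of_pos (by omega)
  have andL : PySem.Str.len "and" = 3 := by decide
  have hunL : PySem.Str.len "hundred" = 7 := by decide
  have thoL : PySem.Str.len "thousand" = 8 := by decide
  have n100 : numbersLengths 100 = 7 := by decide
  have n1000 : numbersLengths 1000 = 8 := by decide
  have eM := lenSmall _ hm0 (by omega)
  have eH := lenSmall _ hh0 (by omega)
  have eT := lenSmall _ ht0 (by omega)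
  by_cases hlow : PySem.Int.mod value 100 < 21
  · have eL := lenSmall _ hl0 hlow
    split_ifs <;>
      simp only [PySem.Str.len_append, div1000_eq value, eL, eM, eH, eT,
        andL, hunL, thoL, n100, n1000, numbersLengthsAnd] at * <;>
      omega
  · have ht2 : 2 ≤ PySem.Int.floordiv (PySem.Int.mod value 100) 10 := by rw [hdiv]; omega
    have ht9 : PySem.Int.floordiv (PySem.Int.mod value 100) 10 ≤ 9 := by rw [hdiv]; omega
    have eTens := lenTens _ ht2 ht9
    split_ifs <;>
      simp only [PySem.Str.len_append, div1000_eq value, eTens, eM, eH, eT,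
        andL, hunL, thoL, n100, n1000, numbersLengthsAnd] at * <;>
      omega
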